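-- pv_equiv track=rewrite | github.com/hyunbeanohh/OIL-legacy-study | legacy-algorithm-study/[프로그래머스 Al]/괄호 변환.py | solution
-- ===== SOURCE A (Python) =====
-- def check(p):
--     stack = []
--     for i in list(p):
--         if i =='(':
--             stack.append('(')
--         else:
--             try :
--                 stack.pop()
--             except :
--                 return False
--     if len(stack) == 0:
--         return True
--     else:
--         return False
--
-- def balanced(p):
--     cnt = 0
--     for idx in range(len(p)):
--         if p[idx] == '(':
--             cnt += 1
--         else:
--             cnt -= 1
--         if cnt == 0:
--             return (idx +1)
--     return idx+1
--
-- def solution(p):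
--     answer = ''
--
--     if (p == '' ) | (check(p) == True) :
--         return p
--
--     idx = balanced(p)
--     u,v = p[:idx], p[idx:]
--
--     if check(u) :
--         answer = u + solution(v)
--     else:
--         answer = '(' + solution(v) + ')'
--         u = u[1:-1].replace('(', 'a')
--         u = u.replace(')', 'b')
--         u = u.replace('a', ')')
--         u = u.replace('b', '(')
--         answer = answer + u
--
--     return answer
-- ===== SOURCE B (Python) =====
-- def _check(p):
--     cnt = 0
--     for ch in p:
--         cnt += 1 if ch == '(' else -1
--         if cnt < 0:
--             return False
--     return cnt == 0
--
-- def _flip(s):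
--     s = s.replace('(', 'a').replace(')', 'b')
--     return s.replace('a', ')').replace('b', '(')
--
-- def solution(p):
--     units = []
--     cur = []
--     cnt = 0
--     for ch in p:
--         cur.append(ch)
--         cnt += 1 if ch == '(' else -1
--         if cnt == 0:
--             units.append(''.join(cur))
--             cur = []
--     if cur:
--         units.append(''.join(cur))
--     acc = ''
--     for u in reversed(units):
--         if _check(u):
--             acc = u + acc
--         else:
--             acc = '(' + acc + ')' + _flip(u[1:-1])
--     return acc
-- ===== Notes on version B (the rewrite author's own statement) =====
-- stated objective: alternative
-- what changed: A recursively re-checks and re-splits every suffix (check(p) early return, balanced, recursive call on v); B scans p once with a counter to cut it into balanced units, then builds the answer with a single right-to-left fold over the unit list, each unit checked once by a counter-based validity test instead of A's stack simulation.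
import Mathlib
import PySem

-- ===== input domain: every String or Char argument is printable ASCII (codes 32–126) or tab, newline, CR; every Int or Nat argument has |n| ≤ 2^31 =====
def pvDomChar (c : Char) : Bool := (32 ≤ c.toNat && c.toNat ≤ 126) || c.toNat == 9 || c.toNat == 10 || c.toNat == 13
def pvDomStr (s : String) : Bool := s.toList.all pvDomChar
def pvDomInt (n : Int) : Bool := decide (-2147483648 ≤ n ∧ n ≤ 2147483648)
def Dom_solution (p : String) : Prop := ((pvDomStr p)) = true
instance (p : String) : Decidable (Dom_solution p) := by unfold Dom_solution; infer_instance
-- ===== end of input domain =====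

-- B replaces A's suffix recursion (re-running check and re-splitting each suffix) by one
-- counter scan cutting p into balanced units followed by a single right-to-left fold; objective: alternative.

-- ===== PORT A =====

-- check(p): stack of '(' pushed/popped; pop on empty stack raises, caught -> False; True iff stack empty at end.
def checkA : List Char → List Char → Bool
  | [], stack => stack.isEmpty
  | c :: r, stack =>
      if c = '(' then checkA r ('(' :: stack)
      else
        match stack with
        | [] => false
        | _ :: s => checkA r s

-- balanced(p): running count over indices; returns idx+1 at the first zero, else len(p).
-- (Python's `balanced` would raise NameError on '', but A only calls it on nonempty p.)
def balA : List Char → Int → Nat → Nat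
  | [], _, idx => idx
  | c :: r, cnt, idx =>
      if cnt + (if c = '(' then 1 else -1) = 0 then idx + 1
      else balA r (cnt + (if c = '(' then 1 else -1)) (idx + 1)

-- u.replace(x, y) for single-char x, y is exactly a character map.
def repA (x y : Char) (l : List Char) : List Char :=
  l.map (fun c => if c = x then y else c)

-- the four-step replace chain A applies to u[1:-1]
def flipA (l : List Char) : List Char :=
  repA 'b' '(' (repA 'a' ')' (repA ')' 'b' (repA '(' 'a' l)))

theorem balA_ge : ∀ (l : List Char) (cnt : Int) (idx : Nat), idx ≤ balA l cnt idx := by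
  intro l
  induction l with
  | nil => intro cnt idx; simp [balA]
  | cons c r ih =>
      intro cnt idx
      simp only [balA]
      by_cases h : cnt + (if c = '(' then 1 else -1) = 0
      · rw [if_pos h]; omega
      · rw [if_neg h]; exact le_trans (Nat.le_succ idx) (ih _ _)

theorem balA_pos : ∀ (l : List Char), l ≠ [] → 1 ≤ balA l 0 0 := by
  intro l h
  match l, h with
  | c :: r, _ =>
    simp only [balA]
    by_cases h : (0 : Int) + (if c = '(' then 1 else -1) = 0
    · rw [if_pos h]
    · rw [if_neg h]; exact le_trans (by omega) (balA_ge r _ 1)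

-- solution(p) on p.toList: u = p[:idx] and v = p[idx:] are take/drop (inlined); u[1:-1] is (drop 1).dropLast.
def solA (l : List Char) : List Char :=
  if _h : l = [] ∨ checkA l [] = true then l
  else if checkA (l.take (balA l 0 0)) [] then
    l.take (balA l 0 0) ++ solA (l.drop (balA l 0 0))
  else
    '(' :: (solA (l.drop (balA l 0 0)) ++ ')' :: flipA (((l.take (balA l 0 0)).drop 1).dropLast))
termination_by l.length
decreasing_by
  all_goals
    have h1 : l ≠ [] := by tauto
    have h2 : 1 ≤ balA l 0 0 := balA_pos l h1
    have h3 : 0 < l.length := List.length_pos_iff.mpr h1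
    simp only [List.length_drop]
    omega

def solution (p : String) : String := String.ofList (solA p.toList)

-- ===== PORT B =====

-- _check(p): one pass with a counter, fail on underflow, True iff it ends at 0.
def checkB : List Char → Int → Bool
  | [], cnt => cnt = 0
  | c :: r, cnt =>
      if cnt + (if c = '(' then 1 else -1) < 0 then false
      else checkB r (cnt + (if c = '(' then 1 else -1))

-- _flip: the same single-char replace chain as Source B (replace = map for 1-char patterns).
def flipB (l : List Char) : List Char :=
  (((l.map (fun c => if c = '(' then 'a' else c)).map
      (fun c => if c = ')' then 'b' else c)).map
      (fun c => if c = 'a' then ')' else c)).map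
      (fun c => if c = 'b' then '(' else c)

-- the splitting loop: cur accumulates the current unit, a unit is emitted when cnt hits 0,
-- a nonempty leftover cur becomes the last unit.
def splitB : List Char → Int → List Char → List (List Char)
  | [], _, cur => if cur = [] then [] else [cur]
  | c :: r, cnt, cur =>
      if cnt + (if c = '(' then 1 else -1) = 0 then (cur ++ [c]) :: splitB r 0 []
      else splitB r (cnt + (if c = '(' then 1 else -1)) (cur ++ [c])

-- for u in reversed(units): acc = u + acc  /  acc = '(' + acc + ')' + _flip(u[1:-1])
def foldB (units : List (List Char)) : List Char :=
  units.reverse.foldl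
    (fun acc u =>
      if checkB u 0 then u ++ acc
      else '(' :: (acc ++ ')' :: flipB ((u.drop 1).dropLast)))
    []

def solution_alt (p : String) : String := String.ofList (foldB (splitB p.toList 0 []))

-- ===== PRECONDITION & SPEC =====
def Spec_solution (p : String) (out : String) : Prop := out = solution_alt p
instance (p : String) (out : String) : Decidable (Spec_solution p out) := by unfold Spec_solution; infer_instance

-- ===== CLAIM (what is proved, stated in full; the proofs are below) =====
def Claim_equal_solution : Prop := ∀ (p : String), Dom_solution p → Spec_solution p (solution p)

-- ===== LEMMAS AND PROOFS =====

theorem checkA_eq_checkB : ∀ (l s : List Char), checkA l s = checkB l (s.length) := by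
  intro l
  induction l with
  | nil =>
      intro s
      cases s with
      | nil => simp [checkA, checkB]
      | cons a t => simp [checkA, checkB]; omega
  | cons c r ih =>
      intro s
      by_cases hc : c = '('
      · have hd : (if c = '(' then (1:Int) else -1) = 1 := by simp [hc]
        rw [show checkA (c :: r) s = checkA r ('(' :: s) from by simp [checkA, hc]]
        rw [show checkB (c :: r) (s.length : Int)
              = if ((s.length:Int) + 1) < 0 then false else checkB r ((s.length:Int) + 1) from by
            simp [checkB, hd]]
        rw [if_neg (by omega), ih ('(' :: s),
          show ((('(' :: s).length : Int)) = (s.length : Int) + 1 from by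
            simp only [List.length_cons]; push_cast; ring]
      · have hd : (if c = '(' then (1:Int) else -1) = -1 := by simp [hc]
        rw [show checkB (c :: r) (s.length : Int)
              = if ((s.length:Int) + -1) < 0 then false else checkB r ((s.length:Int) + -1) from by
            simp [checkB, hd]]
        cases s with
        | nil => simp [checkA, hc]
        | cons a t =>
            rw [show checkA (c :: r) (a :: t) = checkA r t from by simp [checkA, hc]]
            rw [if_neg (by simp only [List.length_cons]; push_cast; omega)]
            rw [show (((a :: t).length : Int) + -1) = (t.length : Int) from by
              simp only [List.length_cons]; push_cast; ring]
            exact ih t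

theorem flipA_eq_flipB : ∀ (l : List Char), flipA l = flipB l := by
  intro l
  simp [flipA, flipB, repA, List.map_map]

theorem balA_shift : ∀ (l : List Char) (cnt : Int) (i : Nat),
    balA l cnt i = i + balA l cnt 0 := by
  intro l
  induction l with
  | nil => intro cnt i; simp [balA]
  | cons c r ih =>
      intro cnt i
      simp only [balA]
      by_cases h : cnt + (if c = '(' then 1 else -1) = 0
      · simp only [if_pos h]
      · simp only [if_neg h]
        rw [ih _ (i + 1), ih _ (0 + 1)]
        omega

theorem splitB_cons : ∀ (l : List Char) (cnt : Int) (cur : List Char), l ≠ [] →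
    splitB l cnt cur =
      (cur ++ l.take (balA l cnt 0)) :: splitB (l.drop (balA l cnt 0)) 0 [] := by
  intro l
  induction l with
  | nil => intro _ _ h; exact absurd rfl h
  | cons c r ih =>
      intro cnt cur _
      simp only [splitB, balA]
      by_cases hz : cnt + (if c = '(' then 1 else -1) = 0
      · simp only [if_pos hz]
        simp
      · simp only [if_neg hz]
        rw [balA_shift r _ 1]
        cases r with
        | nil => simp [splitB, balA]
        | cons a t =>
            rw [ih _ (cur ++ [c]) (by simp)]
            rw [Nat.add_comm 1]
            simp [List.take_succ_cons, List.drop_succ_cons, List.append_assoc]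

theorem checkB_split : ∀ (l : List Char) (cnt : Int), 0 ≤ cnt →
    checkB l cnt = (checkB (l.take (balA l cnt 0)) cnt && checkB (l.drop (balA l cnt 0)) 0) := by
  intro l
  induction l with
  | nil => intro cnt _; simp [balA, checkB]
  | cons c r ih =>
      intro cnt hcnt
      obtain ⟨d, hdef, -⟩ : ∃ d : Int, (if c = '(' then (1:Int) else -1) = d ∧ (d = 1 ∨ d = -1) :=
        ⟨_, rfl, by by_cases hc : c = '(' <;> simp [hc]⟩
      by_cases hz : cnt + d = 0
      · have hbal : balA (c :: r) cnt 0 = 1 := by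
          simp only [balA, hdef]; rw [if_pos hz]
        rw [hbal, show (c :: r).take 1 = [c] from rfl, show (c :: r).drop 1 = r from rfl]
        have e1 : checkB (c :: r) cnt = if cnt + d < 0 then false else checkB r (cnt + d) := by
          simp only [checkB, hdef]
        have e2 : checkB [c] cnt = if cnt + d < 0 then false else checkB [] (cnt + d) := by
          simp only [checkB, hdef]
        rw [e1, e2, if_neg (by omega), if_neg (by omega), hz]
        simp [checkB]
      · have hbal : balA (c :: r) cnt 0 = 1 + balA r (cnt + d) 0 := by
          simp only [balA, hdef]; rw [if_neg hz]; exact balA_shift r _ 1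
        rw [hbal, Nat.add_comm 1, List.take_succ_cons, List.drop_succ_cons]
        have e1 : checkB (c :: r) cnt = if cnt + d < 0 then false else checkB r (cnt + d) := by
          simp only [checkB, hdef]
        have e3 : checkB (c :: r.take (balA r (cnt + d) 0)) cnt
            = if cnt + d < 0 then false
              else checkB (r.take (balA r (cnt + d) 0)) (cnt + d) := by
          simp only [checkB, hdef]
        rw [e1, e3]
        by_cases hneg : cnt + d < 0
        · rw [if_pos hneg, if_pos hneg]; simp
        · rw [if_neg hneg, if_neg hneg]
          exact ih _ (by omega)

theorem foldB_cons : ∀ (u : List Char) (rest : List (List Char)),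
    foldB (u :: rest) =
      (if checkB u 0 then u ++ foldB rest
       else '(' :: (foldB rest ++ ')' :: flipB ((u.drop 1).dropLast))) := by
  intro u rest
  simp only [foldB, List.reverse_cons, List.foldl_append, List.foldl_cons, List.foldl_nil]

theorem solA_eq_foldB_aux : ∀ (n : Nat) (l : List Char), l.length ≤ n →
    solA l = foldB (splitB l 0 []) := by
  intro n
  induction n with
  | zero =>
      intro l h
      have hl : l = [] := List.eq_nil_of_length_eq_zero (by omega)
      subst hl
      simp [solA, splitB, foldB]
  | succ n ih =>
      intro l hlen
      by_cases hnil : l = []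
      · subst hnil; simp [solA, splitB, foldB]
      · have hpos := balA_pos l hnil
        have hlpos : 0 < l.length := List.length_pos_iff.mpr hnil
        set j := balA l 0 0 with hj
        have hsplit := splitB_cons l 0 [] hnil
        rw [← hj] at hsplit
        simp only [List.nil_append] at hsplit
        have ihv : solA (l.drop j) = foldB (splitB (l.drop j) 0 []) := by
          apply ih
          simp only [List.length_drop]
          omega
        have hchk := checkB_split l 0 (by omega)
        rw [← hj] at hchk
        have hcAB : checkA l [] = checkB l 0 := by simpa using checkA_eq_checkB l []
        have hcuAB : checkA (l.take j) [] = checkB (l.take j) 0 := by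
          simpa using checkA_eq_checkB (l.take j) []
        rw [hsplit, foldB_cons]
        by_cases hcl : checkB l 0 = true
        · have hboth := (Bool.and_eq_true _ _).mp (hchk ▸ hcl)
          have hA : solA l = l := by
            rw [solA, dif_pos (Or.inr (by rw [hcAB]; exact hcl))]
          have hAv : solA (l.drop j) = l.drop j := by
            by_cases hv : l.drop j = []
            · rw [hv, solA, dif_pos (Or.inl rfl)]
            · rw [solA, dif_pos (Or.inr (by
                rw [show checkA (l.drop j) [] = checkB (l.drop j) 0 from by
                  simpa using checkA_eq_checkB (l.drop j) []]
                exact hboth.2))]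
          rw [hA, if_pos hboth.1, ← ihv, hAv, List.take_append_drop]
        · have hclA : ¬ (l = [] ∨ checkA l [] = true) := by
            rw [hcAB]; tauto
          rw [solA, dif_neg hclA, ← hj, hcuAB, ihv, flipA_eq_flipB]

theorem solA_eq_foldB (l : List Char) : solA l = foldB (splitB l 0 []) :=
  solA_eq_foldB_aux l.length l le_rfl

-- ===== VERDICT (by name: the statement is the Claim_ definition above) =====
theorem solution_spec : Claim_equal_solution := by
  intro p _
  unfold Spec_solution solution solution_alt
  rw [solA_eq_foldB]
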